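-- pv_equiv track=rewrite | github.com/Pierre-damase/Alignement-seq-reads | bwt/burrows_wheeler/burrows_wheeler_transform.py | nb_inferieurs
-- ===== SOURCE A (Python) =====
-- from collections import Counter
--
-- def nb_inferieurs(bwt):
--     """
--     Génère le nombre d'occurences de caractères plus petits dans la séquence.
--
--     Et ceux pour chaque caractères.
--
--     Parameter
--     ---------
--     bwt: str
--         la séquence transformée
--
--     Return
--     ------
--     inferieurs: dict
--         un dictionnaire des occurences
--     """
--     inferieurs = {'$': 0, 'A': 0, 'C': 0, 'G': 0, 'T': 0}
--     count = Counter(sorted(bwt))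
--     nb = 0
--     for nucleotide in inferieurs.keys():
--         inferieurs[nucleotide] = nb
--         nb += count[nucleotide]
--     return inferieurs
-- ===== SOURCE B (Python) =====
-- def nb_inferieurs(bwt):
--     """For each symbol of the fixed alphabet, count the characters of bwt
--     that belong to the alphabet and are strictly smaller (ASCII order)."""
--     alphabet = ['$', 'A', 'C', 'G', 'T']
--     return {c: sum(1 for x in bwt if x in alphabet and x < c) for c in alphabet}
-- ===== Notes on version B (the rewrite author's own statement) =====
-- stated objective: alternative
-- what changed: Replaces the Counter-plus-running-prefix-sum accumulator with a direct per-symbol definition: each of the five cumulative counts is computed independently as the number of alphabet characters strictly smaller than the symbol.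
import Mathlib
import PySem

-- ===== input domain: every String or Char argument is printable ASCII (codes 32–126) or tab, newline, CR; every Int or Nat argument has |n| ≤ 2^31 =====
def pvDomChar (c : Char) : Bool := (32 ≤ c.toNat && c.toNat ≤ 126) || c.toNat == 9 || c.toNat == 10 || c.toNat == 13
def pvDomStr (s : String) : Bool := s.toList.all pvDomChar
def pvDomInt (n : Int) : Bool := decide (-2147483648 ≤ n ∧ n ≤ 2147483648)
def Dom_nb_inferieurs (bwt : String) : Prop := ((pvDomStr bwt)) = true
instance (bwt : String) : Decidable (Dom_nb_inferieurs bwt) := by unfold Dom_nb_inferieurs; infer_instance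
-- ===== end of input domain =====

-- B computes each of the five cumulative counts independently, by one scan counting the
-- strictly smaller alphabet characters, instead of A's Counter-plus-running-prefix-sum
-- (objective: alternative decomposition, same exact results).
-- Python's 1-character strings (the dict/Counter keys) are modelled as Char internally
-- and rendered as singleton Strings in the returned association list; this is exact.

-- ===== PORT A =====
def nb_inferieurs (bwt : String) : List (String × Int) :=
  -- inferieurs = {'$': 0, 'A': 0, 'C': 0, 'G': 0, 'T': 0}
  let inferieurs : PySem.Dict Char Int :=
    PySem.Dict.ofList [('$', 0), ('A', 0), ('C', 0), ('G', 0), ('T', 0)]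
  -- count = Counter(sorted(bwt))
  let count : PySem.Dict Char Int :=
    PySem.Dict.counter (PySem.List.sorted bwt.toList (fun x => x) false)
  -- nb = 0; for nucleotide in inferieurs.keys(): inferieurs[nucleotide] = nb; nb += count[nucleotide]
  let res := inferieurs.keys.foldl
    (fun (st : PySem.Dict Char Int × Int) n =>
      (st.1.insert n st.2, st.2 + count.getD n 0)) (inferieurs, 0)
  res.1.items.map (fun p => (String.ofList [p.1], p.2))

-- ===== PORT B =====
def nb_inferieurs_alt (bwt : String) : List (String × Int) :=
  let alphabet : List Char := ['$', 'A', 'C', 'G', 'T']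
  alphabet.map (fun c =>
    (String.ofList [c],
     (bwt.toList.countP (fun x => decide (x ∈ alphabet) && decide (x < c)) : Int)))

-- ===== PRECONDITION & SPEC =====
def Spec_nb_inferieurs (bwt : String) (out : List (String × Int)) : Prop := out = nb_inferieurs_alt bwt
instance (bwt : String) (out : List (String × Int)) : Decidable (Spec_nb_inferieurs bwt out) := by unfold Spec_nb_inferieurs; infer_instance

-- ===== CLAIM (what is proved, stated in full; the proofs are below) =====
def Claim_equal_nb_inferieurs : Prop := ∀ (bwt : String), Dom_nb_inferieurs bwt → Spec_nb_inferieurs bwt (nb_inferieurs bwt)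

-- ===== LEMMAS AND PROOFS =====

-- A's loop over the five fixed keys, evaluated with the per-symbol counts abstracted as f.
theorem pv_foldA (f : Char → Int) :
    (List.map (fun p => (String.ofList [p.1], p.2))
      ((List.foldl (fun (st : PySem.Dict Char Int × Int) n => (st.1.insert n st.2, st.2 + f n))
        (PySem.Dict.ofList [('$',0),('A',0),('C',0),('G',0),('T',0)], 0)
        (PySem.Dict.ofList [('$',0),('A',0),('C',0),('G',0),('T',0)]).keys).1.items))
    = [("$", 0), ("A", 0 + f '$'), ("C", 0 + f '$' + f 'A'),
       ("G", 0 + f '$' + f 'A' + f 'C'), ("T", 0 + f '$' + f 'A' + f 'C' + f 'G')] := rfl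

-- countP of a disjunction of mutually exclusive tests splits into a sum.
theorem pv_countP_or (p q : Char → Bool) (h : ∀ x, p x = true → q x = false) (l : List Char) :
    List.countP (fun x => p x || q x) l = l.countP p + l.countP q := by
  induction l with
  | nil => rfl
  | cons a t ih =>
    by_cases hp : p a = true
    · have hq := h a hp
      simp [hp, hq, ih]; omega
    · simp only [Bool.not_eq_true] at hp
      by_cases hq : q a = true <;> simp [hp, hq, ih]
      omega

-- B's membership-and-strictly-smaller test, identified pointwise per alphabet symbol.
theorem pv_ptw0 (x : Char) :
    ((decide (x = '$' ∨ x = 'A' ∨ x = 'C' ∨ x = 'G' ∨ x = 'T')) && decide (x < '$')) = false := by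
  by_cases h1 : x = '$'; · subst h1; decide
  by_cases h2 : x = 'A'; · subst h2; decide
  by_cases h3 : x = 'C'; · subst h3; decide
  by_cases h4 : x = 'G'; · subst h4; decide
  by_cases h5 : x = 'T'; · subst h5; decide
  simp [h1, h2, h3, h4, h5]

theorem pv_ptw1 (x : Char) :
    ((decide (x = '$' ∨ x = 'A' ∨ x = 'C' ∨ x = 'G' ∨ x = 'T')) && decide (x < 'A'))
      = decide (x = '$') := by
  by_cases h1 : x = '$'; · subst h1; decide
  by_cases h2 : x = 'A'; · subst h2; decide
  by_cases h3 : x = 'C'; · subst h3; decide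
  by_cases h4 : x = 'G'; · subst h4; decide
  by_cases h5 : x = 'T'; · subst h5; decide
  simp [h1, h2, h3, h4, h5]

theorem pv_ptw2 (x : Char) :
    ((decide (x = '$' ∨ x = 'A' ∨ x = 'C' ∨ x = 'G' ∨ x = 'T')) && decide (x < 'C'))
      = (decide (x = '$') || decide (x = 'A')) := by
  by_cases h1 : x = '$'; · subst h1; decide
  by_cases h2 : x = 'A'; · subst h2; decide
  by_cases h3 : x = 'C'; · subst h3; decide
  by_cases h4 : x = 'G'; · subst h4; decide
  by_cases h5 : x = 'T'; · subst h5; decide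
  simp [h1, h2, h3, h4, h5]

theorem pv_ptw3 (x : Char) :
    ((decide (x = '$' ∨ x = 'A' ∨ x = 'C' ∨ x = 'G' ∨ x = 'T')) && decide (x < 'G'))
      = (decide (x = '$') || (decide (x = 'A') || decide (x = 'C'))) := by
  by_cases h1 : x = '$'; · subst h1; decide
  by_cases h2 : x = 'A'; · subst h2; decide
  by_cases h3 : x = 'C'; · subst h3; decide
  by_cases h4 : x = 'G'; · subst h4; decide
  by_cases h5 : x = 'T'; · subst h5; decide
  simp [h1, h2, h3, h4, h5]

theorem pv_ptw4 (x : Char) :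
    ((decide (x = '$' ∨ x = 'A' ∨ x = 'C' ∨ x = 'G' ∨ x = 'T')) && decide (x < 'T'))
      = (decide (x = '$') || (decide (x = 'A') || (decide (x = 'C') || decide (x = 'G')))) := by
  by_cases h1 : x = '$'; · subst h1; decide
  by_cases h2 : x = 'A'; · subst h2; decide
  by_cases h3 : x = 'C'; · subst h3; decide
  by_cases h4 : x = 'G'; · subst h4; decide
  by_cases h5 : x = 'T'; · subst h5; decide
  simp [h1, h2, h3, h4, h5]

-- two distinct symbol tests are mutually exclusive
theorem pv_disj (a b : Char) (hab : a ≠ b) (x : Char) (h : decide (x = a) = true) :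
    decide (x = b) = false := by simp_all

theorem pv_cnt1 (c : Char) (l : List Char) : List.countP (fun x => decide (x = c)) l = List.count c l :=
  (List.count_eq_countP ..).symm

-- ===== VERDICT (by name: the statement is the Claim_ definition above) =====
theorem nb_inferieurs_spec : Claim_equal_nb_inferieurs := by
  intro bwt _
  unfold Spec_nb_inferieurs
  have hcs : ∀ a : Char,
      List.count a (PySem.List.sorted bwt.toList (fun x => x) false) = List.count a bwt.toList :=
    fun a => (PySem.List.sorted_perm bwt.toList (fun x => x) false).count_eq a
  simp only [nb_inferieurs, nb_inferieurs_alt, PySem.Dict.getD_counter]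
  refine Eq.trans (pv_foldA
    (fun n => ((List.count n (PySem.List.sorted bwt.toList (fun x => x) false) : Int)))) ?_
  simp only [hcs, List.map, List.mem_cons, List.not_mem_nil, or_false,
    pv_ptw0, pv_ptw1, pv_ptw2, pv_ptw3, pv_ptw4]
  rw [pv_countP_or _ _ (pv_disj '$' 'A' (by decide)),
      pv_countP_or _ _ (fun x h => by rcases of_decide_eq_true h with h; subst h; decide),
      pv_countP_or _ _ (pv_disj 'A' 'C' (by decide)),
      pv_countP_or _ _ (fun x h => by rcases of_decide_eq_true h with h; subst h; decide),
      pv_countP_or _ _ (fun x h => by rcases of_decide_eq_true h with h; subst h; decide),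
      pv_countP_or _ _ (pv_disj 'C' 'G' (by decide))]
  simp only [pv_cnt1, List.countP_false]
  push_cast
  simp only [Function.const_apply, List.cons.injEq, Prod.mk.injEq, true_and, and_true]
  omega
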